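-- pv_equiv track=rewrite | github.com/jaykim429/korea-statistic-MCP-cginside | kosis_analysis/metadata.py | _fanout_filter_sets
-- ===== SOURCE A (Python) =====
-- from itertools import product
--
-- def _fanout_filter_sets(filters: dict[str, list[str]]) -> list[dict[str, list[str]]]:
--     """Return one single-code filter set per Cartesian product.
--
--     KOSIS often rejects comma-joined multi-code parameters with code 21. The
--     public contract can still accept multi-code filters by faning out safely
--     inside the server and merging raw rows afterward.
--     """
--     axes = list(filters.keys())
--     code_groups = [filters[axis] or [] for axis in axes]
--     if not axes or any(not codes for codes in code_groups):
--         return [filters]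
--     return [
--         {axis: [code] for axis, code in zip(axes, combo)}
--         for combo in product(*code_groups)
--     ]
-- ===== SOURCE B (Python) =====
-- def _fanout_filter_sets(filters: dict[str, list[str]]) -> list[dict[str, list[str]]]:
--     """Fan out multi-code filters by mixed-radix index decoding instead of itertools.product."""
--     axes = list(filters)
--     groups = [filters[a] or [] for a in axes]
--     total = 1
--     for g in groups:
--         total *= len(g)
--     if not axes or total == 0:
--         return [filters]
--     out = []
--     for i in range(total):
--         rem = i
--         codes = []
--         for g in reversed(groups):
--             rem, j = divmod(rem, len(g))
--             codes.append(g[j])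
--         codes.reverse()
--         out.append({a: [c] for a, c in zip(axes, codes)})
--     return out
-- ===== Notes on version B (the rewrite author's own statement) =====
-- stated objective: alternative
-- what changed: Replaces itertools.product enumeration with mixed-radix index decoding: count the total number of combinations, then for each integer index decode one code per axis by repeated divmod over the group lengths (last axis fastest), instead of materializing combos via product and zip.
import Mathlib
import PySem

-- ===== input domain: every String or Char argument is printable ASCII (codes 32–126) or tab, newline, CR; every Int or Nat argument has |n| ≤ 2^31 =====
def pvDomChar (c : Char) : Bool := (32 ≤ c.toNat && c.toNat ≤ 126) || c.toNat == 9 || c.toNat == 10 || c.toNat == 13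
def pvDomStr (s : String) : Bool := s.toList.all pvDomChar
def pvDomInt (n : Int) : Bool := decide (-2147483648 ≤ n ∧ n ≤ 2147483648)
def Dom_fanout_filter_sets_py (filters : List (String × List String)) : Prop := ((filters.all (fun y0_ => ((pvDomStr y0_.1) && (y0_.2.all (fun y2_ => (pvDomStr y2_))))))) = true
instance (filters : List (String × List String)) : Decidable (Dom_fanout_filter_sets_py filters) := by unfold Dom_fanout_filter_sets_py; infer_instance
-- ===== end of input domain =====

-- B replaces itertools.product with mixed-radix index decoding: it counts combinations by an
-- integer index and decodes each index into one code per axis by repeated divmod (alternative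
-- decomposition, same cost). The input assoc list represents a Python dict, so its keys are
-- distinct; hence filters[axis] is that pair's own value.

-- ===== PORT A =====
-- itertools.product over a list of groups: first group varies slowest (Python's order).
def pvProduct : List (List String) → List (List String)
  | [] => [[]]
  | g :: gs => g.flatMap (fun c => (pvProduct gs).map (fun combo => c :: combo))

def fanout_filter_sets_py (filters : List (String × List String)) : List (List (String × List String)) :=
  let axes := filters.map (fun p => p.1)
  let code_groups := filters.map (fun p => p.2)   -- filters[axis] or [] : the pair's own value (see header)
  if axes.isEmpty || code_groups.any (fun codes => codes.isEmpty) then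
    [filters]
  else
    (pvProduct code_groups).map (fun combo =>
      (axes.zip combo).map (fun q => (q.1, [q.2])))

-- ===== PORT B =====
-- the inner 'for g in reversed(groups): rem, j = divmod(rem, len(g)); codes.append(g[j])' loop;
-- g[j] is exact via pyGetD since 0 ≤ j < len(g) (divmod remainder by a positive length).
def pvDecodeRev : Int → List (List String) → List String
  | _, [] => []
  | rem, g :: gs =>
      PySem.List.pyGetD g (PySem.Int.mod rem (g.length : Int)) ""
        :: pvDecodeRev (PySem.Int.floordiv rem (g.length : Int)) gs

def fanout_filter_sets_py_alt (filters : List (String × List String)) : List (List (String × List String)) :=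
  let axes := filters.map (fun p => p.1)
  let groups := filters.map (fun p => p.2)
  let total := groups.foldl (fun t g => t * (g.length : Int)) 1
  if axes.isEmpty || total == 0 then
    [filters]
  else
    (PySem.List.pyRange 0 total 1).map (fun i =>
      let codes := (pvDecodeRev i groups.reverse).reverse
      (axes.zip codes).map (fun q => (q.1, [q.2])))

-- ===== PRECONDITION & SPEC =====
def Spec_fanout_filter_sets_py (filters : List (String × List String)) (out : List (List (String × List String))) : Prop := out = fanout_filter_sets_py_alt filters
instance (filters : List (String × List String)) (out : List (List (String × List String))) : Decidable (Spec_fanout_filter_sets_py filters out) := by unfold Spec_fanout_filter_sets_py; infer_instance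

-- ===== CLAIM =====
def Claim_equal_fanout_filter_sets_py : Prop := ∀ (filters : List (String × List String)), Dom_fanout_filter_sets_py filters → Spec_fanout_filter_sets_py filters (fanout_filter_sets_py filters)

-- ===== LEMMAS AND PROOFS =====

-- B's running product equals the Nat product of the group lengths.
theorem foldl_total (gs : List (List String)) (t : Int) :
    gs.foldl (fun t g => t * (g.length : Int)) t = t * ((gs.map List.length).prod : Nat) := by
  induction gs generalizing t with
  | nil => simp
  | cons g gs ih => simp [ih, mul_assoc]

theorem range_mul_map {α : Type} (P L : Nat) (f : Nat → α) :
    (List.range (P * L)).map f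
      = (List.range P).flatMap (fun q => (List.range L).map (fun r => f (q * L + r))) := by
  induction P with
  | zero => simp
  | succ P ih =>
      have h : (P + 1) * L = P * L + L := by ring
      rw [h, List.range_add, List.map_append, ih, List.range_succ, List.flatMap_append]
      simp [List.map_map, Function.comp_def]

theorem getD_range_map (g : List String) :
    (List.range g.length).map (fun r => g.getD r "") = g := by
  apply List.ext_getElem
  · simp
  · intro i h1 h2
    simp [List.getD_eq_getElem?_getD, List.getElem?_eq_getElem h2]

theorem pvProduct_append_singleton (ds : List (List String)) (g : List String) :
    pvProduct (ds ++ [g]) = (pvProduct ds).flatMap (fun combo => g.map (fun c => combo ++ [c])) := by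
  induction ds with
  | nil =>
      simp only [List.nil_append, pvProduct, List.flatMap_cons, List.flatMap_nil,
        List.append_nil, List.map_cons, List.map_nil]
      induction g with
      | nil => rfl
      | cons c cs ihg => simp [List.flatMap_cons] at ihg ⊢; exact ihg
  | cons d ds ih =>
      simp [pvProduct, ih, List.map_flatMap, List.flatMap_map, List.flatMap_assoc,
        Function.comp_def, List.map_map]

-- Main lemma: decoding every index below the product of the lengths enumerates pvProduct.
theorem decode_range (gs : List (List String)) (hne : ∀ g ∈ gs, g ≠ []) :
    (List.range ((gs.map List.length).prod)).map
        (fun n : Nat => (pvDecodeRev (n : Int) gs.reverse).reverse)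
      = pvProduct gs := by
  induction gs using List.reverseRecOn with
  | nil => simp [pvDecodeRev, pvProduct]
  | append_singleton ds g ih =>
      have hg : g ≠ [] := hne g (by simp)
      have hL : 0 < g.length := List.length_pos_iff.mpr hg
      have ihds := ih (fun x hx => hne x (by simp [hx]))
      rw [pvProduct_append_singleton, ← ihds, List.flatMap_map]
      have hprod : ((ds ++ [g]).map List.length).prod
          = (ds.map List.length).prod * g.length := by simp
      rw [hprod, range_mul_map]
      congr 1
      funext q
      conv_rhs => rw [← getD_range_map g, List.map_map]
      apply List.map_congr_left
      intro r hr
      rw [List.mem_range] at hr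
      have hrev : (ds ++ [g]).reverse = g :: ds.reverse := by simp
      rw [hrev]
      show (pvDecodeRev ((q * g.length + r : Nat) : Int) (g :: ds.reverse)).reverse = _
      have hmod : PySem.Int.mod ((q * g.length + r : Nat) : Int) (g.length : Int)
          = ((r : Nat) : Int) := by
        rw [PySem.Int.mod_natCast]
        rw [Nat.mul_comm q g.length, Nat.mul_add_mod, Nat.mod_eq_of_lt hr]
      have hdiv : PySem.Int.floordiv ((q * g.length + r : Nat) : Int) (g.length : Int)
          = ((q : Nat) : Int) := by
        rw [PySem.Int.floordiv_natCast]
        rw [Nat.mul_comm q g.length, Nat.mul_add_div hL, Nat.div_eq_of_lt hr, Nat.add_zero]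
      simp only [pvDecodeRev, hmod, hdiv, PySem.List.pyGetD_natCast, List.reverse_cons,
        Function.comp_def]

-- ===== VERDICT =====
theorem fanout_filter_sets_py_spec : Claim_equal_fanout_filter_sets_py := by
  intro filters _
  unfold Spec_fanout_filter_sets_py fanout_filter_sets_py fanout_filter_sets_py_alt
  dsimp only
  have htot : (filters.map (fun p => p.2)).foldl (fun t g => t * (g.length : Int)) 1
      = (((filters.map (fun p => p.2)).map List.length).prod : Nat) := by
    rw [foldl_total]; ring
  have hguard : ((filters.map (fun p => p.2)).foldl (fun t g => t * (g.length : Int)) 1 == 0)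
      = (filters.map (fun p => p.2)).any (fun codes => codes.isEmpty) := by
    rw [htot, Bool.eq_iff_iff]
    simp [List.prod_eq_zero_iff, List.isEmpty_iff, List.length_eq_zero_iff]
  rw [hguard]
  split_ifs with h
  · rfl
  · have hne : ∀ g ∈ filters.map (fun p => p.2), g ≠ [] := by
      intro g hgmem
      simp only [Bool.or_eq_true, not_or, List.any_eq_true, not_exists] at h
      intro hnil
      exact h.2 g ⟨hgmem, by simp [hnil]⟩
    rw [htot, PySem.List.pyRange_one]
    have h0 : ((((filters.map (fun p => p.2)).map List.length).prod : Nat) : Int) - 0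
        = (((filters.map (fun p => p.2)).map List.length).prod : Nat) := by ring
    rw [h0, Int.toNat_natCast, List.map_map, ← decode_range (filters.map (fun p => p.2)) hne,
      List.map_map]
    apply List.map_congr_left
    intro n _
    simp
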